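-- pv_equiv track=rewrite | github.com/rishabh1jain/Dissertation | util.py | get_all_out_edges_recursivly
-- ===== SOURCE A (Python) =====
-- def get_all_out_edges_recursivly_helper(out_edges,whose):
-- 	temp = []
-- 	if whose in out_edges:
-- 		for j in out_edges[whose]:
-- 			temp.append(j[1])
-- 		return temp
-- 	return temp
--
-- def get_all_out_edges_recursivly(out_edges,whose):
-- 	temp = get_all_out_edges_recursivly_helper(out_edges,whose)
-- 	immediate_out_edges = temp
-- 	if len(immediate_out_edges) == 0: #The word itself has no dependents
-- 		return []
-- 	else:
-- 		o = len(immediate_out_edges)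
-- 		i = 0
-- 		while(i<o):
-- 			immediate_out_edges = immediate_out_edges + get_all_out_edges_recursivly_helper(out_edges,immediate_out_edges[i])
-- 			o = len(immediate_out_edges)
-- 			i = i + 1
-- 		return immediate_out_edges
-- ===== SOURCE B (Python) =====
-- def get_all_out_edges_recursivly(out_edges, whose):
--     # Level-order traversal: emit whole frontiers and build the next level at once,
--     # instead of A's index-driven growing queue.
--     frontier = [j[1] for j in out_edges.get(whose, [])]
--     result = []
--     while frontier:
--         result += frontier
--         frontier = [j[1] for node in frontier for j in out_edges.get(node, [])]
--     return result
-- ===== Notes on version B (the rewrite author's own statement) =====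
-- stated objective: alternative
-- what changed: Replaced A's index-driven growing queue (q = q + succs(q[i]) per processed node) by a level-order loop that emits each whole frontier and builds the next level in one comprehension.
import Mathlib
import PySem

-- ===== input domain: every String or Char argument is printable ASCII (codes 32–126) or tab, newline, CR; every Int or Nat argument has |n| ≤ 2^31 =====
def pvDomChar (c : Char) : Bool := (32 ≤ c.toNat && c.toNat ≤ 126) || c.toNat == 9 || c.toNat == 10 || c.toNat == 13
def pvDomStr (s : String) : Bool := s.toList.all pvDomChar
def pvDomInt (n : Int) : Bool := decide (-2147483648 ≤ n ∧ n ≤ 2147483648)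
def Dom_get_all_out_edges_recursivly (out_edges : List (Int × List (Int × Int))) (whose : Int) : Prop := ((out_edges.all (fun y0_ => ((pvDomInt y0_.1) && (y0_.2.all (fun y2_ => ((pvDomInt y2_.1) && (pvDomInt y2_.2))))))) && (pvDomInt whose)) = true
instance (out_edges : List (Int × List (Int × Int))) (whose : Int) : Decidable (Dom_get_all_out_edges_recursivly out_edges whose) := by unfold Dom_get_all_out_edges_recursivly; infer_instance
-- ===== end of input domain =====

-- B traverses level by level (emit the whole frontier, build the next one) instead of A's
-- index-driven growing queue; same output in the same order, duplicates included.


-- shared successor function: targets of the out-edges of `x` (dict lookup = first match, default [])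
def pvSuccs (out_edges : List (Int × List (Int × Int))) (x : Int) : List Int :=
  ((out_edges.lookup x).getD []).map (·.2)

-- the frontier after d breadth-first steps (used by the precondition and the fuel bound)
def pvIter (out_edges : List (Int × List (Int × Int))) : Nat → List Int → List Int
  | Nat.zero, F => F
  | Nat.succ d, F => pvIter out_edges d (F.flatMap (pvSuccs out_edges))

-- total number of queue entries A ever enqueues from frontier F within d levels (A's exact fuel)
def pvSum (out_edges : List (Int × List (Int × Int))) : Nat → List Int → Nat
  | 0, _ => 0
  | d+1, F => F.length + pvSum out_edges d (F.flatMap (pvSuccs out_edges))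

-- ===== PORT A =====
-- helper: temp = []; if whose in out_edges: for j in out_edges[whose]: temp.append(j[1])
def get_all_out_edges_recursivly_helper (out_edges : List (Int × List (Int × Int))) (whose : Int) : List Int :=
  match out_edges.lookup whose with
  | some es => es.foldl (fun temp j => temp ++ [j.2]) []
  | none => []

-- the while loop: q grows in place, i walks it; fuel only makes it total (A diverges on cyclic input)
def pvLoopA (out_edges : List (Int × List (Int × Int))) : Nat → List Int → Nat → List Int
  | 0, q, _ => q
  | f+1, q, i =>
      if h : i < q.length then
        pvLoopA out_edges f (q ++ get_all_out_edges_recursivly_helper out_edges q[i]) (i+1)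
      else q

def get_all_out_edges_recursivly (out_edges : List (Int × List (Int × Int))) (whose : Int) : List Int :=
  let temp := get_all_out_edges_recursivly_helper out_edges whose
  if temp.length = 0 then []
  else pvLoopA out_edges (pvSum out_edges out_edges.length temp) temp 0

-- ===== PORT B =====
-- while frontier: result += frontier; frontier = next level; fuel only makes it total
def pvLoopB (out_edges : List (Int × List (Int × Int))) : Nat → List Int → List Int → List Int
  | 0, res, _ => res
  | f+1, res, frontier =>
      if frontier = [] then res
      else pvLoopB out_edges f (res ++ frontier) (frontier.flatMap (pvSuccs out_edges))

def get_all_out_edges_recursivly_alt (out_edges : List (Int × List (Int × Int))) (whose : Int) : List Int :=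
  pvLoopB out_edges (out_edges.length + 1) [] (pvSuccs out_edges whose)

-- ===== PRECONDITION & SPEC =====
-- Pre_ holds exactly when every walk from `whose` has at most |out_edges| edges, i.e. the part of
-- the graph reachable from `whose` is acyclic; on every other input Python A LOOPS FOREVER
-- (its queue never stops growing), so nothing returned by A is excluded.
def Pre_get_all_out_edges_recursivly (out_edges : List (Int × List (Int × Int))) (whose : Int) : Prop :=
  pvIter out_edges out_edges.length (pvSuccs out_edges whose) = []
instance (out_edges : List (Int × List (Int × Int))) (whose : Int) : Decidable (Pre_get_all_out_edges_recursivly out_edges whose) := by unfold Pre_get_all_out_edges_recursivly; infer_instance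

def pvWitness_get_all_out_edges_recursivly : (List (Int × List (Int × Int))) × Int :=
  ([(0, [(0, 1), (0, 2)]), (1, [(1, 2)])], 0)

def Spec_get_all_out_edges_recursivly (out_edges : List (Int × List (Int × Int))) (whose : Int) (out : List Int) : Prop := out = get_all_out_edges_recursivly_alt out_edges whose
instance (out_edges : List (Int × List (Int × Int))) (whose : Int) (out : List Int) : Decidable (Spec_get_all_out_edges_recursivly out_edges whose out) := by unfold Spec_get_all_out_edges_recursivly; infer_instance

-- ===== CLAIM (what is proved, stated in full; the proofs are below) =====
def Claim_equal_get_all_out_edges_recursivly : Prop := ∀ (out_edges : List (Int × List (Int × Int))) (whose : Int), Dom_get_all_out_edges_recursivly out_edges whose → Pre_get_all_out_edges_recursivly out_edges whose → Spec_get_all_out_edges_recursivly out_edges whose (get_all_out_edges_recursivly out_edges whose)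

-- ===== LEMMAS AND PROOFS =====

-- A's helper collects the second components: it IS pvSuccs
theorem pv_foldl_append (es : List (Int × Int)) (acc : List Int) :
    es.foldl (fun temp j => temp ++ [j.2]) acc = acc ++ es.map (·.2) := by
  induction es generalizing acc with
  | nil => simp
  | cons e es ih => simp [List.foldl, ih]

theorem helper_eq (out_edges : List (Int × List (Int × Int))) (x : Int) :
    get_all_out_edges_recursivly_helper out_edges x = pvSuccs out_edges x := by
  unfold get_all_out_edges_recursivly_helper pvSuccs
  cases out_edges.lookup x with
  | none => simp
  | some es =>
    show es.foldl (fun temp j => temp ++ [j.2]) [] = _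
    rw [pv_foldl_append]
    simp

-- the "virtual todo list" view of A's loop
def pvFA (out_edges : List (Int × List (Int × Int))) : Nat → List Int → List Int
  | 0, todo => todo
  | _+1, [] => []
  | f+1, x :: r => x :: pvFA out_edges f (r ++ pvSuccs out_edges x)

theorem pvFA_nil (out_edges : List (Int × List (Int × Int))) (f : Nat) :
    pvFA out_edges f [] = [] := by cases f <;> rfl

-- A's loop at index i = |done| over queue done ++ todo appends exactly pvFA of todo
theorem loopA_eq_fa (out_edges : List (Int × List (Int × Int))) :
    ∀ (f : Nat) (done todo : List Int),
      pvLoopA out_edges f (done ++ todo) done.length = done ++ pvFA out_edges f todo := by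
  intro f
  induction f with
  | zero => intro done todo; rfl
  | succ f ih =>
    intro done todo
    cases todo with
    | nil =>
      simp [pvLoopA, pvFA]
    | cons x r =>
      have hlt : done.length < (done ++ x :: r).length := by simp
      rw [pvLoopA]
      rw [dif_pos hlt]
      have hget : (done ++ x :: r)[done.length]'hlt = x := by
        rw [List.getElem_append_right (Nat.le_refl _)]
        simp
      rw [hget, helper_eq]
      have hq : (done ++ x :: r) ++ pvSuccs out_edges x
          = (done ++ [x]) ++ (r ++ pvSuccs out_edges x) := by simp
      have hi : done.length + 1 = (done ++ [x]).length := by simp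
      rw [hq, hi, ih (done ++ [x]) (r ++ pvSuccs out_edges x)]
      simp [pvFA]

-- processing a whole frontier F moves its successors to the end of the todo list
theorem fa_level (out_edges : List (Int × List (Int × Int))) :
    ∀ (F : List Int) (f : Nat) (T : List Int),
      pvFA out_edges (F.length + f) (F ++ T)
        = F ++ pvFA out_edges f (T ++ F.flatMap (pvSuccs out_edges)) := by
  intro F
  induction F with
  | nil => intro f T; simp
  | cons x F ih =>
    intro f T
    have h1 : (x :: F).length + f = (F.length + f) + 1 := by simp; omega
    rw [h1]
    show x :: pvFA out_edges (F.length + f) ((F ++ T) ++ pvSuccs out_edges x) = _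
    have h2 : (F ++ T) ++ pvSuccs out_edges x = F ++ (T ++ pvSuccs out_edges x) := by
      simp [List.append_assoc]
    rw [h2, ih f (T ++ pvSuccs out_edges x)]
    simp [List.flatMap_cons, List.append_assoc]

-- with exact fuel, A's virtual todo run equals B's level loop
theorem fa_eq_loopB (out_edges : List (Int × List (Int × Int))) :
    ∀ (d : Nat) (F : List Int), pvIter out_edges d F = [] →
      ∀ (f g : Nat) (res : List Int),
        res ++ pvFA out_edges (pvSum out_edges d F + f) F = pvLoopB out_edges (d + 1 + g) res F := by
  intro d
  induction d with
  | zero =>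
    intro F hF f g res
    have hF' : F = [] := hF
    subst hF'
    rw [pvFA_nil]
    rw [show 0 + 1 + g = g + 1 from by omega]
    simp [pvLoopB]
  | succ d ih =>
    intro F hF f g res
    by_cases hFe : F = []
    · subst hFe
      rw [pvFA_nil]
      rw [show d + 1 + 1 + g = (d + 1 + g) + 1 from by omega]
      simp [pvLoopB]
    · have hsum : pvSum out_edges (d+1) F + f
          = F.length + (pvSum out_edges d (F.flatMap (pvSuccs out_edges)) + f) := by
        simp [pvSum]; omega
      rw [hsum]
      have hFsplit : pvFA out_edges (F.length + (pvSum out_edges d (F.flatMap (pvSuccs out_edges)) + f)) F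
          = F ++ pvFA out_edges (pvSum out_edges d (F.flatMap (pvSuccs out_edges)) + f)
              (F.flatMap (pvSuccs out_edges)) := by
        have := fa_level out_edges F (pvSum out_edges d (F.flatMap (pvSuccs out_edges)) + f) []
        simpa using this
      rw [hFsplit, ← List.append_assoc]
      have hiter : pvIter out_edges d (F.flatMap (pvSuccs out_edges)) = [] := hF
      rw [ih (F.flatMap (pvSuccs out_edges)) hiter f g (res ++ F)]
      rw [show d + 1 + 1 + g = (d + 1 + g) + 1 from by omega]
      simp [pvLoopB, hFe]

-- ===== VERDICT (by name: the statement is the Claim_ definition above) =====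
theorem get_all_out_edges_recursivly_spec : Claim_equal_get_all_out_edges_recursivly := by
  intro out_edges whose _hdom hpre
  unfold Spec_get_all_out_edges_recursivly
  unfold get_all_out_edges_recursivly get_all_out_edges_recursivly_alt
  rw [helper_eq]
  by_cases h0 : (pvSuccs out_edges whose).length = 0
  · have hF : pvSuccs out_edges whose = [] := List.length_eq_zero_iff.mp h0
    rw [if_pos h0, hF]
    simp [pvLoopB]
  · rw [if_neg h0]
    have h1 := loopA_eq_fa out_edges
      (pvSum out_edges out_edges.length (pvSuccs out_edges whose)) [] (pvSuccs out_edges whose)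
    simp only [List.nil_append, List.length_nil] at h1
    rw [h1]
    have h2 := fa_eq_loopB out_edges out_edges.length (pvSuccs out_edges whose) hpre 0 0 []
    simp only [List.nil_append, Nat.add_zero] at h2
    rw [h2]
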